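-- pv_equiv track=rewrite | github.com/RogerGuevara555/Portafolios-de-proyectos | Mini-proyectos/$5 y $3/cinco_y_tres_pesos.py | all_payment_combinations
-- ===== SOURCE A (Python) =====
-- def all_payment_combinations(bills : list, initiated = False) -> list:
--     # Retorna una lista con todas las posibles formas de pago en listas
--
--     if not initiated:
--         while bills.count(5) >= 3:
--             for _ in range(3): bills.remove(5)
--             for _ in range(5): bills.append(3)
--         return all_payment_combinations(bills, True)
--
--     else:
--         combinations = [bills.copy()]
--         while bills.count(3) >= 5:
--             for _ in range(5): bills.remove(3)
--             for _ in range(3): bills.append(5)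
--             bills.sort(reverse=True)
--             combinations.append(bills.copy())
--         return combinations
-- ===== SOURCE B (Python) =====
-- def all_payment_combinations(bills, initiated=False):
--     # Count-based reconstruction: build the first configuration in one pass,
--     # then emit each further combination directly from the (5s, 3s) counts
--     # merged into pre-sorted bands, instead of repeated remove/append/sort.
--     # (Alternative algorithm; note: unlike A, this does not mutate the caller's list.)
--     if not initiated:
--         fives = bills.count(5)
--         drop = fives - fives % 3
--         first = []
--         removed = 0
--         for x in bills:
--             if x == 5 and removed < drop:
--                 removed += 1
--             else:
--                 first.append(x)
--         first.extend([3] * (5 * (drop // 3)))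
--     else:
--         first = list(bills)
--     t = first.count(3)
--     f = first.count(5)
--     others = sorted((x for x in first if x != 3 and x != 5), reverse=True)
--     hi = [x for x in others if x > 5]
--     mid = [x for x in others if 3 < x < 5]
--     lo = [x for x in others if x < 3]
--     combos = [first]
--     while t >= 5:
--         t -= 5
--         f += 3
--         combos.append(hi + [5] * f + mid + [3] * t + lo)
--     return combos
-- ===== Notes on version B (the rewrite author's own statement) =====
-- stated objective: alternative
-- what changed: Instead of repeatedly scanning/removing/appending and re-sorting the list (A), B builds the first configuration in one pass from the count of 5s, sorts the non-3/5 elements once into three bands, and emits every further combination directly from the running (fives, threes) counts concatenated with those pre-sorted bands.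
import Mathlib
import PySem

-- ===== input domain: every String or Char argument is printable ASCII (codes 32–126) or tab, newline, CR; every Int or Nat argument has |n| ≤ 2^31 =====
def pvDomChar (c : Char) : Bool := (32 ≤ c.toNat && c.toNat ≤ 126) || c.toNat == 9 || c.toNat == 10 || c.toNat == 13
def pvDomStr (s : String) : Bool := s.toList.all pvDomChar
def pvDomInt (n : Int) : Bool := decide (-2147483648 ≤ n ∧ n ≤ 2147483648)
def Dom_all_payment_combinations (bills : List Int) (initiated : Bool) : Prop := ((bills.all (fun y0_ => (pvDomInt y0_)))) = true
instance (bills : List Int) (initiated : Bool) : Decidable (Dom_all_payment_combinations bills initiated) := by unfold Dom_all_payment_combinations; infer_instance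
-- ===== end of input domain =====

-- B rebuilds each combination from the (5s, 3s) counts merged into pre-sorted bands instead of
-- repeated remove/append/sort (objective: alternative algorithm). Equivalence is about the
-- RETURN value only: A mutates its `bills` argument in place, B does not.

-- ===== PORT A =====

-- A's `while bills.count(5) >= 3: remove three 5s, append five 3s`.
-- `bills.remove(5)` is ported as `List.erase` — exact here because the loop guard
-- guarantees a 5 is present (PySem.List.remove?_eq_some_erase).
def pvPhase1 (bills : List Int) : List Int :=
  if 3 ≤ bills.count 5 then
    pvPhase1 ((((bills.erase 5).erase 5).erase 5) ++ [3, 3, 3, 3, 3])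
  else bills
termination_by bills.count 5
decreasing_by
  rename_i h
  have h1 : (bills.erase 5).count 5 = bills.count 5 - 1 := List.count_erase_self ..
  have h2 : ((bills.erase 5).erase 5).count 5 = (bills.erase 5).count 5 - 1 := List.count_erase_self ..
  have h3 : (((bills.erase 5).erase 5).erase 5).count 5 = ((bills.erase 5).erase 5).count 5 - 1 := List.count_erase_self ..
  simp [List.count_append, h1, h2, h3]
  omega

-- A's `while bills.count(3) >= 5` loop: remove five 3s, append three 5s, sort descending,
-- record a copy; again each `bills.remove(3)` happens under the count guard.
def pvPhase2 (bills : List Int) (combinations : List (List Int)) : List (List Int) :=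
  if 5 ≤ bills.count 3 then
    let b := PySem.List.sorted ((((((bills.erase 3).erase 3).erase 3).erase 3).erase 3) ++ [5, 5, 5]) (fun x => x) true
    pvPhase2 b (combinations ++ [b])
  else combinations
termination_by bills.count 3
decreasing_by
  rename_i h
  have hp := PySem.List.sorted_perm ((((((bills.erase 3).erase 3).erase 3).erase 3).erase 3) ++ [5, 5, 5]) (fun x : Int => x) true
  have := hp.count_eq 3
  simp [List.count_append, List.count_erase_self] at this
  simp [this]
  omega

-- A with initiated=False normalizes excess 5s and recurses with True; the True branch is inlined.
def all_payment_combinations (bills : List Int) (initiated : Bool) : List (List Int) :=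
  if !initiated then
    let b := pvPhase1 bills
    pvPhase2 b [b]
  else
    pvPhase2 bills [bills]

-- ===== PORT B =====

-- B's single pass over bills dropping the first `drop` fives (the `removed` counter).
def pvFirstPass (l : List Int) (removed : Int) (drop : Int) : List Int :=
  match l with
  | [] => []
  | x :: t => if x = 5 ∧ removed < drop then pvFirstPass t (removed + 1) drop
              else x :: pvFirstPass t removed drop

-- B's `while t >= 5` loop emitting each combination from counts and the pre-sorted bands.
def pvBLoop (hi mid lo : List Int) (f t : Int) : List (List Int) :=
  if 5 ≤ t then
    (hi ++ List.replicate (f + 3).toNat 5 ++ mid ++ List.replicate (t - 5).toNat 3 ++ lo)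
      :: pvBLoop hi mid lo (f + 3) (t - 5)
  else []
termination_by t.toNat
decreasing_by omega

def all_payment_combinations_alt (bills : List Int) (initiated : Bool) : List (List Int) :=
  let first :=
    if !initiated then
      let fives : Int := bills.count 5
      let drop : Int := fives - PySem.Int.mod fives 3
      pvFirstPass bills 0 drop ++ List.replicate (5 * PySem.Int.floordiv drop 3).toNat 3
    else bills
  let t : Int := first.count 3
  let f : Int := first.count 5
  let others := PySem.List.sorted (first.filter (fun x => decide (x ≠ 3 ∧ x ≠ 5))) (fun x => x) true
  let hi := others.filter (fun x => decide (5 < x))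
  let mid := others.filter (fun x => decide (3 < x ∧ x < 5))
  let lo := others.filter (fun x => decide (x < 3))
  first :: pvBLoop hi mid lo f t

-- ===== PRECONDITION & SPEC =====
def Spec_all_payment_combinations (bills : List Int) (initiated : Bool) (out : List (List Int)) : Prop := out = all_payment_combinations_alt bills initiated
instance (bills : List Int) (initiated : Bool) (out : List (List Int)) : Decidable (Spec_all_payment_combinations bills initiated out) := by unfold Spec_all_payment_combinations; infer_instance

-- ===== CLAIM (what is proved, stated in full; the proofs are below) =====
def Claim_equal_all_payment_combinations : Prop := ∀ (bills : List Int) (initiated : Bool), Dom_all_payment_combinations bills initiated → Spec_all_payment_combinations bills initiated (all_payment_combinations bills initiated)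

-- ===== LEMMAS AND PROOFS =====

def pvOthers (l : List Int) : List Int :=
  PySem.List.sorted (l.filter (fun x => decide (x ≠ 3 ∧ x ≠ 5))) (fun x => x) true

def pvHi (l : List Int) : List Int := (pvOthers l).filter (fun x => decide (5 < x))

def pvMid (l : List Int) : List Int := (pvOthers l).filter (fun x => decide (3 < x ∧ x < 5))

def pvLo (l : List Int) : List Int := (pvOthers l).filter (fun x => decide (x < 3))

theorem cfil (p : Int → Bool) (m : List Int) (a : Int) : (m.filter p).count a = if p a then m.count a else 0 := by
  by_cases h : p a
  · simp [h, List.count_filter]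
  · simp only [h, Bool.false_eq_true, if_false]
    rw [List.count_eq_zero]; simp [List.mem_filter, h]

theorem pvDescUnique {l₁ l₂ : List Int} (hp : l₁.Perm l₂)
    (h1 : l₁.Pairwise (fun a b => b ≤ a)) (h2 : l₂.Pairwise (fun a b => b ≤ a)) : l₁ = l₂ :=
  PySem.List.eq_of_perm_of_pairwise_le_of_injective (fun x : Int => -x) neg_injective hp
    (h1.imp (fun h => by simpa using h)) (h2.imp (fun h => by simpa using h))

theorem pvCanon (l : List Int) :
    PySem.List.sorted l (fun x => x) true
      = pvHi l ++ List.replicate (l.count 5) 5 ++ pvMid l ++ List.replicate (l.count 3) 3 ++ pvLo l := by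
  have hoc : ∀ a : Int, (pvOthers l).count a = if a ≠ 3 ∧ a ≠ 5 then l.count a else 0 := by
    intro a
    unfold pvOthers
    rw [(PySem.List.sorted_perm _ _ _).count_eq, cfil]
    split_ifs with h1 h2 <;> simp_all
  have hop : (pvOthers l).Pairwise (fun a b : Int => b ≤ a) := PySem.List.sorted_pairwise_rev _ _
  have h5 : ∀ x ∈ pvHi l, (5:Int) < x := by
    intro x hx; simpa using (List.mem_filter.mp hx).2
  have h4 : ∀ x ∈ pvMid l, (3:Int) < x ∧ x < 5 := by
    intro x hx; simpa using (List.mem_filter.mp hx).2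
  have h2 : ∀ x ∈ pvLo l, x < (3:Int) := by
    intro x hx; simpa using (List.mem_filter.mp hx).2
  apply pvDescUnique
  · refine (PySem.List.sorted_perm _ _ _).trans (List.perm_iff_count.mpr ?_)
    intro a
    simp only [List.count_append, pvHi, pvMid, pvLo, cfil, hoc, List.count_replicate, beq_iff_eq]
    split_ifs <;> simp_all <;> omega
  · exact PySem.List.sorted_pairwise_rev _ _
  · simp only [List.pairwise_append]
    refine ⟨⟨⟨⟨hop.filter _, List.pairwise_replicate.mpr (Or.inr le_rfl), ?_⟩,
      hop.filter _, ?_⟩, List.pairwise_replicate.mpr (Or.inr le_rfl), ?_⟩, hop.filter _, ?_⟩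
    · intro a ha b hb
      have := h5 a ha; have := List.eq_of_mem_replicate hb; omega
    · intro a ha b hb
      have hb' := h4 b hb
      rcases List.mem_append.mp ha with h | h
      · have := h5 a h; omega
      · have := List.eq_of_mem_replicate h; omega
    · intro a ha b hb
      have hb' := List.eq_of_mem_replicate hb
      rcases List.mem_append.mp ha with h | h
      · rcases List.mem_append.mp h with h | h
        · have := h5 a h; omega
        · have := List.eq_of_mem_replicate h; omega
      · have := h4 a h; omega
    · intro a ha b hb
      have hb' := h2 b hb
      rcases List.mem_append.mp ha with h | h
      · rcases List.mem_append.mp h with h | h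
        · rcases List.mem_append.mp h with h | h
          · have := h5 a h; omega
          · have := List.eq_of_mem_replicate h; omega
        · have := h4 a h; omega
      · have := List.eq_of_mem_replicate h; omega

theorem pvOthers_congr {x y : List Int} (h : ∀ a : Int, a ≠ 3 → a ≠ 5 → x.count a = y.count a) :
    pvOthers x = pvOthers y := by
  apply pvDescUnique ?_ (PySem.List.sorted_pairwise_rev _ _) (PySem.List.sorted_pairwise_rev _ _)
  refine ((PySem.List.sorted_perm _ _ _).trans (List.perm_iff_count.mpr ?_)).trans
    (PySem.List.sorted_perm _ _ _).symm
  intro a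
  rw [cfil, cfil]
  by_cases h3 : a = 3
  · simp [h3]
  · by_cases h5 : a = 5
    · simp [h5]
    · simp [h3, h5, h a h3 h5]

theorem pvHi_congr {x y : List Int} (h : pvOthers x = pvOthers y) : pvHi x = pvHi y := by
  simp [pvHi, h]

theorem pvMid_congr {x y : List Int} (h : pvOthers x = pvOthers y) : pvMid x = pvMid y := by
  simp [pvMid, h]

theorem pvLo_congr {x y : List Int} (h : pvOthers x = pvOthers y) : pvLo x = pvLo y := by
  simp [pvLo, h]

theorem pvPhase2_eq (b : List Int) (acc : List (List Int)) :
    pvPhase2 b acc = acc ++ pvBLoop (pvHi b) (pvMid b) (pvLo b) (b.count 5 : Int) (b.count 3 : Int) := by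
  fun_induction pvPhase2 b acc with
  | case1 b acc h bb ih =>
    set l0 := (((((b.erase 3).erase 3).erase 3).erase 3).erase 3) ++ [5, 5, 5] with hl0
    have hc3 : l0.count 3 = b.count 3 - 5 := by
      simp [hl0, List.count_append, List.count_erase]; omega
    have hc5 : l0.count 5 = b.count 5 + 3 := by
      simp [hl0, List.count_append, List.count_erase]
    have hoth : ∀ a : Int, a ≠ 3 → a ≠ 5 → l0.count a = b.count a := by
      intro a h3 h5
      simp [hl0, List.count_append, List.count_erase, h3, h5, Ne.symm h3, Ne.symm h5]
    have hO : pvOthers l0 = pvOthers b := pvOthers_congr hoth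
    have hbbc3 : bb.count 3 = b.count 3 - 5 := by
      rw [(PySem.List.sorted_perm _ _ _).count_eq]; exact hc3
    have hbbc5 : bb.count 5 = b.count 5 + 3 := by
      rw [(PySem.List.sorted_perm _ _ _).count_eq]; exact hc5
    have hObb : pvOthers bb = pvOthers b := by
      refine (pvOthers_congr ?_).trans hO
      intro a _ _; exact (PySem.List.sorted_perm _ _ _).count_eq a
    have hbb : bb = pvHi b ++ List.replicate (b.count 5 + 3) 5 ++ pvMid b
        ++ List.replicate (b.count 3 - 5) 3 ++ pvLo b := by
      have hcan := pvCanon l0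
      rw [hc3, hc5] at hcan
      rw [show bb = PySem.List.sorted l0 (fun x => x) true from rfl, hcan,
        pvHi_congr hO, pvMid_congr hO, pvLo_congr hO]
    have ht : (5:Int) ≤ (b.count 3 : Int) := by exact_mod_cast h
    have e5 : ((b.count 5 : Int) + 3).toNat = b.count 5 + 3 := by omega
    have e3 : ((b.count 3 : Int) - 5).toNat = b.count 3 - 5 := by omega
    have hstep : pvBLoop (pvHi b) (pvMid b) (pvLo b) (b.count 5 : Int) (b.count 3 : Int)
        = bb :: pvBLoop (pvHi bb) (pvMid bb) (pvLo bb) (bb.count 5 : Int) (bb.count 3 : Int) := by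
      rw [pvBLoop, if_pos ht]
      congr 1
      · rw [hbb, e5, e3]
      · rw [pvHi_congr hObb, pvMid_congr hObb, pvLo_congr hObb, hbbc3, hbbc5]
        congr 1 <;> omega
    rw [ih, hstep]
    simp
  | case2 b acc h =>
    rw [pvBLoop]
    have hn : ¬ (5:Int) ≤ (b.count 3 : Int) := by exact_mod_cast h
    rw [if_neg hn]
    simp

theorem fp_ext (l : List Int) (r d r' d' : Int) (h : d - r = d' - r') :
    pvFirstPass l r d = pvFirstPass l r' d' := by
  induction l generalizing r d r' d' with
  | nil => rfl
  | cons x t ih =>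
    rw [pvFirstPass, pvFirstPass]
    by_cases hc : x = 5 ∧ r < d
    · rw [if_pos hc, if_pos ⟨hc.1, by omega⟩]
      exact ih (r + 1) d (r' + 1) d' (by omega)
    · rw [if_neg hc, if_neg (by rintro ⟨h5, hlt⟩; exact hc ⟨h5, by omega⟩)]
      rw [ih r d r' d' h]

theorem fp_le (l : List Int) (r d : Int) (h : d ≤ r) : pvFirstPass l r d = l := by
  induction l generalizing r with
  | nil => rfl
  | cons x t ih =>
    rw [pvFirstPass, if_neg (by rintro ⟨-, hlt⟩; omega), ih r h]

theorem fp_step (l : List Int) (r d : Int) (h : r < d) :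
    pvFirstPass l r d = pvFirstPass (l.erase 5) (r + 1) d := by
  induction l generalizing r with
  | nil => rfl
  | cons x t ih =>
    by_cases h5 : x = 5
    · subst h5
      rw [pvFirstPass, if_pos ⟨rfl, h⟩, List.erase_cons_head]
    · rw [pvFirstPass, if_neg (by tauto), List.erase_cons_tail (by simpa using h5), pvFirstPass,
        if_neg (by tauto), ih r h]

theorem fp_append3 (l : List Int) (r d : Int) (k : Nat) :
    pvFirstPass (l ++ List.replicate k 3) r d = pvFirstPass l r d ++ List.replicate k 3 := by
  induction l generalizing r with
  | nil =>
    simp only [List.nil_append, pvFirstPass]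
    induction k with
    | zero => rfl
    | succ n ihk =>
      rw [List.replicate_succ, pvFirstPass, if_neg (by rintro ⟨h3, -⟩; omega)]
      rw [ihk]
  | cons x t ih =>
    rw [List.cons_append, pvFirstPass, pvFirstPass]
    by_cases hc : x = 5 ∧ r < d
    · rw [if_pos hc, if_pos hc, ih]
    · rw [if_neg hc, if_neg hc, ih, List.cons_append]

theorem pvPhase1_eq (l : List Int) :
    pvPhase1 l = pvFirstPass l 0 ((l.count 5 : Int) - PySem.Int.mod (l.count 5 : Int) 3)
      ++ List.replicate (5 * PySem.Int.floordiv ((l.count 5 : Int) - PySem.Int.mod (l.count 5 : Int) 3) 3).toNat 3 := by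
  fun_induction pvPhase1 l with
  | case1 l h ih =>
    set l' := (((l.erase 5).erase 5).erase 5) ++ [3, 3, 3, 3, 3] with hl'
    have hcnt : l'.count 5 = l.count 5 - 3 := by
      simp [hl', List.count_append, List.count_erase]; omega
    rw [ih, hcnt]
    rw [PySem.Int.mod_eq_emod_of_pos (by norm_num), PySem.Int.mod_eq_emod_of_pos (by norm_num),
      PySem.Int.floordiv_eq_ediv_of_pos (by norm_num), PySem.Int.floordiv_eq_ediv_of_pos (by norm_num)]
    set m := l.count 5 with hm
    have hm3 : (3:Nat) ≤ m := h
    have hc : ((m - 3 : Nat) : Int) = (m : Int) - 3 := by omega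
    rw [hc]
    set D : Int := (m : Int) - (m : Int) % 3 with hD
    have hD3 : 3 ≤ D := by omega
    have hDd : ((m : Int) - 3) - ((m : Int) - 3) % 3 = D - 3 := by omega
    rw [hDd]
    have hfp : pvFirstPass l' 0 (D - 3) = pvFirstPass (((l.erase 5).erase 5).erase 5) 0 (D - 3) ++ List.replicate 5 3 := by
      rw [hl']; exact fp_append3 _ 0 (D - 3) 5
    rw [hfp]
    have hchain : pvFirstPass l 0 D = pvFirstPass (((l.erase 5).erase 5).erase 5) 0 (D - 3) := by
      have s1 : pvFirstPass l 0 D = pvFirstPass (l.erase 5) 1 D := by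
        rw [fp_step l 0 D (by omega)]; norm_num
      have s2 : pvFirstPass (l.erase 5) 1 D = pvFirstPass ((l.erase 5).erase 5) 2 D := by
        rw [fp_step _ 1 D (by omega)]; norm_num
      have s3 : pvFirstPass ((l.erase 5).erase 5) 2 D = pvFirstPass (((l.erase 5).erase 5).erase 5) 3 D := by
        rw [fp_step _ 2 D (by omega)]; norm_num
      rw [s1, s2, s3, fp_ext _ 3 D 0 (D - 3) (by omega)]
    rw [← hchain, List.append_assoc, ← List.replicate_add]
    congr 2
    omega
  | case2 l h =>
    have hm : l.count 5 < 3 := by omega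
    have hmod : PySem.Int.mod ((l.count 5 : Nat) : Int) 3 = (l.count 5 : Int) := by
      rw [PySem.Int.mod_eq_emod_of_pos (by norm_num)]; omega
    rw [hmod]
    simp [fp_le l 0 0 le_rfl, PySem.Int.floordiv]

-- ===== VERDICT (by name: the statement is the Claim_ definition above) =====
theorem all_payment_combinations_spec : Claim_equal_all_payment_combinations := by
  intro bills initiated _
  unfold Spec_all_payment_combinations all_payment_combinations all_payment_combinations_alt
  cases initiated with
  | true => simp [pvPhase2_eq, pvHi, pvMid, pvLo, pvOthers]
  | false => simp [pvPhase2_eq, pvPhase1_eq, pvHi, pvMid, pvLo, pvOthers]
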